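-- pv_equiv track=rewrite | github.com/edt-yxz-zzd/python3_src | seed/math/primality_proving__plain.py | iter_N_exs__zpow_dominance_Nmm__fixed_bit_length_
-- ===== SOURCE A (Python) =====
-- def iter_N_exs__zpow_dominance_Nmm__fixed_bit_length_(num_bits4N, begin_odd4Nmm=1, /):
--     '-> Iter (num_bits4N, odd4Nmm, ez4Nmm)'
--     assert num_bits4N >= 2
--     assert begin_odd4Nmm&1 == 1
--     #bug:assert 1 <= begin_odd4Nmm <= 1<<(num_bits4N-2)
--         # ... <= 1 if num_bits4N==2
--     assert 1 <= begin_odd4Nmm < 1<<(num_bits4N//2)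
--         # ... < 2 if num_bits4N==2
--
--     for odd4Nmm in range(begin_odd4Nmm, (1<<(num_bits4N-1)) +1, 2):
--         L = odd4Nmm.bit_length()
--         ez4Nmm = num_bits4N -L
--         if L <= ez4Nmm:
--             yield (num_bits4N, odd4Nmm, ez4Nmm)
--         else:
--             break
--     return
-- ===== SOURCE B (Python) =====
-- def iter_N_exs__zpow_dominance_Nmm__fixed_bit_length_(num_bits4N, begin_odd4Nmm=1, /):
--     '-> Iter (num_bits4N, odd4Nmm, ez4Nmm)'
--     assert num_bits4N >= 2
--     assert begin_odd4Nmm & 1 == 1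
--     assert 1 <= begin_odd4Nmm < 1 << (num_bits4N // 2)
--     # bucket the odds by bit length: all odds of bit length L share ez4Nmm = num_bits4N - L,
--     # and only bit lengths up to num_bits4N//2 satisfy L <= num_bits4N - L.
--     bL = begin_odd4Nmm.bit_length()
--     for L in range(bL, num_bits4N // 2 + 1):
--         lo = begin_odd4Nmm if L == bL else (1 << (L - 1)) + 1
--         ez4Nmm = num_bits4N - L
--         for odd4Nmm in range(lo, 1 << L, 2):
--             yield (num_bits4N, odd4Nmm, ez4Nmm)
-- ===== Notes on version B (the rewrite author's own statement) =====
-- stated objective: alternative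
-- what changed: B buckets the odds by bit length: an outer loop over bit lengths L up to num_bits4N//2 with ez4Nmm = num_bits4N - L computed once per bucket, and an inner loop over the odds of that bit length, instead of A's single scan that recomputes bit_length per element and tests-and-breaks.
import Mathlib
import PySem

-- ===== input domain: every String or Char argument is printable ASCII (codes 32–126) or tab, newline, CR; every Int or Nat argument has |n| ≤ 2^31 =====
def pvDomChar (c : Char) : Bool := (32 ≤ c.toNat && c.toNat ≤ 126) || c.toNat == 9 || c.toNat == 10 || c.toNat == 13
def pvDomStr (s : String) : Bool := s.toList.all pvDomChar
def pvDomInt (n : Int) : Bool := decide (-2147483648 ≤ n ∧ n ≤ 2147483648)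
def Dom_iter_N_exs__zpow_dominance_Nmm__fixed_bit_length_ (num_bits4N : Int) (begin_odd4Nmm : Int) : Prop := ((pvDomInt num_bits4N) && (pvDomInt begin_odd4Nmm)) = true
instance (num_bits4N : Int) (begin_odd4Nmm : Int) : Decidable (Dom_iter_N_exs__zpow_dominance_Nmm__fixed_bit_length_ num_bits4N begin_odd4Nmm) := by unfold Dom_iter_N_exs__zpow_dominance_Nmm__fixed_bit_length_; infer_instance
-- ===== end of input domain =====

-- B buckets the odds by bit length (outer loop over bit lengths, ez computed once per
-- bucket) instead of A's single test-and-break scan ('alternative');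
-- the asserts' failures are excluded by Pre_ (both programs raise AssertionError there).

-- ===== PORT A =====
-- the loop body of A: walk the odds, yield while L <= ez, break otherwise;
-- fuel = the length of Python's range(begin, (1<<(num_bits4N-1))+1, 2)
def pvALoop (num_bits4N : Int) (fuel : Nat) (odd4Nmm : Int) : List (Int × Int × Int) :=
  match fuel with
  | 0 => []
  | f + 1 =>
    let L : Int := (PySem.Int.bitLength odd4Nmm : Int)
    let ez4Nmm := num_bits4N - L
    if L ≤ ez4Nmm then
      (num_bits4N, odd4Nmm, ez4Nmm) :: pvALoop num_bits4N f (odd4Nmm + 2)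
    else
      []

def iter_N_exs__zpow_dominance_Nmm__fixed_bit_length_ (num_bits4N : Int) (begin_odd4Nmm : Int) : List (Int × Int × Int) :=
  pvALoop num_bits4N
    ((((2 : Int) ^ ((num_bits4N - 1).toNat) + 1 - begin_odd4Nmm).toNat + 1) / 2)
    begin_odd4Nmm

-- ===== PORT B =====
-- outer loop over bit lengths L = bL .. num_bits4N//2, inner loop over the odds of bit length L
def iter_N_exs__zpow_dominance_Nmm__fixed_bit_length__alt (num_bits4N : Int) (begin_odd4Nmm : Int) : List (Int × Int × Int) :=
  (PySem.List.pyRange ((PySem.Int.bitLength begin_odd4Nmm : Int)) (PySem.Int.floordiv num_bits4N 2 + 1) 1).flatMap (fun L =>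
    (PySem.List.pyRange
        (if L = (PySem.Int.bitLength begin_odd4Nmm : Int) then begin_odd4Nmm
         else (2 : Int) ^ ((L - 1).toNat) + 1)
        ((2 : Int) ^ (L.toNat)) 2).map
      (fun odd4Nmm => (num_bits4N, odd4Nmm, num_bits4N - L)))

-- ===== PRECONDITION & SPEC =====
-- Pre_ = exactly the inputs passing A's three asserts (elsewhere A raises AssertionError)
def Pre_iter_N_exs__zpow_dominance_Nmm__fixed_bit_length_ (num_bits4N : Int) (begin_odd4Nmm : Int) : Prop :=
  2 ≤ num_bits4N ∧ PySem.Int.band begin_odd4Nmm 1 = 1 ∧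
    1 ≤ begin_odd4Nmm ∧ begin_odd4Nmm < (2 : Int) ^ ((PySem.Int.floordiv num_bits4N 2).toNat)
instance (num_bits4N : Int) (begin_odd4Nmm : Int) : Decidable (Pre_iter_N_exs__zpow_dominance_Nmm__fixed_bit_length_ num_bits4N begin_odd4Nmm) := by unfold Pre_iter_N_exs__zpow_dominance_Nmm__fixed_bit_length_; infer_instance

def pvWitness_iter_N_exs__zpow_dominance_Nmm__fixed_bit_length_ : Int × Int := (4, 1)

def Spec_iter_N_exs__zpow_dominance_Nmm__fixed_bit_length_ (num_bits4N : Int) (begin_odd4Nmm : Int) (out : List (Int × Int × Int)) : Prop := out = iter_N_exs__zpow_dominance_Nmm__fixed_bit_length__alt num_bits4N begin_odd4Nmm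
instance (num_bits4N : Int) (begin_odd4Nmm : Int) (out : List (Int × Int × Int)) : Decidable (Spec_iter_N_exs__zpow_dominance_Nmm__fixed_bit_length_ num_bits4N begin_odd4Nmm out) := by unfold Spec_iter_N_exs__zpow_dominance_Nmm__fixed_bit_length_; infer_instance

-- ===== CLAIM (what is proved, stated in full; the proofs are below) =====
def Claim_equal_iter_N_exs__zpow_dominance_Nmm__fixed_bit_length_ : Prop := ∀ (num_bits4N : Int) (begin_odd4Nmm : Int), Dom_iter_N_exs__zpow_dominance_Nmm__fixed_bit_length_ num_bits4N begin_odd4Nmm → Pre_iter_N_exs__zpow_dominance_Nmm__fixed_bit_length_ num_bits4N begin_odd4Nmm → Spec_iter_N_exs__zpow_dominance_Nmm__fixed_bit_length_ num_bits4N begin_odd4Nmm (iter_N_exs__zpow_dominance_Nmm__fixed_bit_length_ num_bits4N begin_odd4Nmm)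

-- ===== LEMMAS AND PROOFS =====

lemma pv_floordiv_two (n : Int) : PySem.Int.floordiv n 2 = n / 2 := by
  simp [PySem.Int.floordiv, Int.fdiv_eq_ediv]

lemma pyRange_two_eq_nil {a b : Int} (h : b ≤ a) : PySem.List.pyRange a b 2 = [] := by
  rw [PySem.List.pyRange_of_pos a b (by norm_num)]
  simp [show ¬ a < b by omega]

lemma pyRange_two_cons {a b : Int} (h : a < b) :
    PySem.List.pyRange a b 2 = a :: PySem.List.pyRange (a + 2) b 2 := by
  rw [PySem.List.pyRange_of_pos a b (by norm_num),
      PySem.List.pyRange_of_pos (a + 2) b (by norm_num)]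
  have hm : ((b - a + 2 - 1) / 2).toNat
      = (if a + 2 < b then ((b - (a + 2) + 2 - 1) / 2).toNat else 0) + 1 := by
    split_ifs <;> omega
  rw [if_pos h, hm, List.range_succ_eq_map]
  simp [List.map_map, Function.comp]
  intro k _
  ring

-- the yield condition of A is equivalent to odd < 2^(n//2)
lemma pv_cond_iff (n odd : Int) (hn : 2 ≤ n) (ho : 1 ≤ odd) :
    ((PySem.Int.bitLength odd : Int) ≤ n - (PySem.Int.bitLength odd : Int))
      ↔ odd < (2 : Int) ^ ((PySem.Int.floordiv n 2).toNat) := by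
  rw [pv_floordiv_two]
  set L : Nat := PySem.Int.bitLength odd with hL
  have habs : (odd.natAbs : Int) = odd := by omega
  have hk : ((n / 2).toNat : Int) = n / 2 := by omega
  constructor
  · intro hcond
    have h2 : (L : Int) ≤ n / 2 := by omega
    have hLe : L ≤ (n / 2).toNat := by omega
    have := PySem.Int.lt_two_pow_bitLength odd
    calc odd = (odd.natAbs : Int) := habs.symm
      _ < ((2 ^ L : Nat) : Int) := by exact_mod_cast this
      _ ≤ ((2 ^ (n / 2).toNat : Nat) : Int) := by
            exact_mod_cast Nat.pow_le_pow_right (by norm_num) hLe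
      _ = (2 : Int) ^ ((n / 2).toNat) := by push_cast; ring
  · intro hlt
    by_contra hcond
    have hgt : (n / 2).toNat + 1 ≤ L := by omega
    have hne : odd ≠ 0 := by omega
    have hle := PySem.Int.two_pow_bitLength_le odd hne
    have : (2 ^ (n / 2).toNat : Nat) ≤ 2 ^ (L - 1) :=
      Nat.pow_le_pow_right (by norm_num) (by omega)
    have h3 : ((2 ^ (n / 2).toNat : Nat) : Int) ≤ odd := by
      calc ((2 ^ (n / 2).toNat : Nat) : Int) ≤ ((2 ^ (L - 1) : Nat) : Int) := by exact_mod_cast this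
        _ ≤ (odd.natAbs : Int) := by exact_mod_cast hle
        _ = odd := habs
    have : (2 : Int) ^ ((n / 2).toNat) ≤ odd := by push_cast at h3; linarith
    omega

-- loop invariant: with enough fuel, A's loop produces exactly the odds below 2^(n//2)
lemma pv_loop_eq (n : Int) (hn : 2 ≤ n) :
    ∀ (fuel : Nat) (odd : Int), 1 ≤ odd →
      (2 : Int) ^ ((PySem.Int.floordiv n 2).toNat) ≤ odd + 2 * fuel →
      pvALoop n fuel odd
        = (PySem.List.pyRange odd ((2 : Int) ^ ((PySem.Int.floordiv n 2).toNat)) 2).map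
            (fun o => (n, o, n - (PySem.Int.bitLength o : Int))) := by
  intro fuel
  induction fuel with
  | zero =>
    intro odd ho hfu
    rw [pyRange_two_eq_nil (by simpa using hfu)]
    simp [pvALoop]
  | succ f ih =>
    intro odd ho hfu
    by_cases h : odd < (2 : Int) ^ ((PySem.Int.floordiv n 2).toNat)
    · rw [pvALoop, if_pos ((pv_cond_iff n odd hn ho).mpr h), pyRange_two_cons h,
          List.map_cons, ih (odd + 2) (by omega) (by push_cast at hfu ⊢; omega)]
    · rw [pvALoop, if_neg (by rw [pv_cond_iff n odd hn ho]; exact h),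
          pyRange_two_eq_nil (by omega), List.map_nil]

-- an odd in [2^(L-1), 2^L) has bit length exactly L
lemma pv_bitLength_eq (L o : Int) (hL : 1 ≤ L)
    (h1 : (2 : Int) ^ ((L - 1).toNat) ≤ o) (h2 : o < (2 : Int) ^ (L.toNat)) :
    (PySem.Int.bitLength o : Int) = L := by
  have hpow1 : ((2 ^ ((L - 1).toNat) : Nat) : Int) = (2 : Int) ^ ((L - 1).toNat) := by
    push_cast; ring
  have hpow2 : ((2 ^ (L.toNat) : Nat) : Int) = (2 : Int) ^ (L.toNat) := by
    push_cast; ring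
  have hp := pow_pos (show (0:Int) < 2 by norm_num) ((L - 1).toNat)
  have ho1 : 1 ≤ o := by omega
  have hne : o ≠ 0 := by omega
  have habs : (o.natAbs : Int) = o := by omega
  set B : Nat := PySem.Int.bitLength o with hB
  have hup := PySem.Int.lt_two_pow_bitLength o
  have hlow := PySem.Int.two_pow_bitLength_le o hne
  -- show B = L.toNat
  have hBeq : B = L.toNat := by
    by_contra hne2
    rcases Nat.lt_or_ge B L.toNat with hlt | hge
    · -- o < 2^B ≤ 2^(L-1) ≤ o
      have : (2 ^ B : Nat) ≤ 2 ^ ((L - 1).toNat) := Nat.pow_le_pow_right (by norm_num) (by omega)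
      have h4 : (o.natAbs : Int) < ((2 ^ ((L - 1).toNat) : Nat) : Int) := by
        exact_mod_cast lt_of_lt_of_le hup this
      rw [habs, hpow1] at h4
      omega
    · -- 2^(L.toNat) ≤ 2^(B-1) ≤ o < 2^(L.toNat)
      have hgt : L.toNat < B := by omega
      have : (2 ^ (L.toNat) : Nat) ≤ 2 ^ (B - 1) := Nat.pow_le_pow_right (by norm_num) (by omega)
      have h4 : ((2 ^ (L.toNat) : Nat) : Int) ≤ (o.natAbs : Int) := by
        exact_mod_cast le_trans this hlow
      rw [habs, hpow2] at h4
      omega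
  omega

-- monotonicity of Int powers of two via the Nat cast
lemma pv_pow_le_pow {a b : Nat} (h : a ≤ b) : (2 : Int) ^ a ≤ (2 : Int) ^ b := by
  have : (2 ^ a : Nat) ≤ 2 ^ b := Nat.pow_le_pow_right (by norm_num) h
  calc (2 : Int) ^ a = ((2 ^ a : Nat) : Int) := by push_cast; ring
    _ ≤ ((2 ^ b : Nat) : Int) := by exact_mod_cast this
    _ = (2 : Int) ^ b := by push_cast; ring

lemma pv_flatMap_congr {α β : Type} {l : List α} {f g : α → List β}
    (h : ∀ x ∈ l, f x = g x) : l.flatMap f = l.flatMap g := by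
  induction l with
  | nil => rfl
  | cons a t ih =>
    simp only [List.flatMap_cons, h a (by simp), ih (fun x hx => h x (by simp [hx]))]

-- the bucketed flatMap equals the flat map over all remaining odds
lemma pv_buckets (n : Int) :
    ∀ (μ : Nat) (L start : Int), 1 ≤ L → L ≤ PySem.Int.floordiv n 2 →
      start % 2 = 1 → (2 : Int) ^ ((L - 1).toNat) ≤ start → start < (2 : Int) ^ (L.toNat) →
      (2 : Int) ^ ((PySem.Int.floordiv n 2).toNat) ≤ start + 2 * μ →
      ((PySem.List.pyRange start ((2 : Int) ^ (L.toNat)) 2).map (fun o => (n, o, n - L)) ++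
        (PySem.List.pyRange (L + 1) (PySem.Int.floordiv n 2 + 1) 1).flatMap
          (fun L' => (PySem.List.pyRange ((2 : Int) ^ ((L' - 1).toNat) + 1) ((2 : Int) ^ (L'.toNat)) 2).map
            (fun o => (n, o, n - L'))))
      = (PySem.List.pyRange start ((2 : Int) ^ ((PySem.Int.floordiv n 2).toNat)) 2).map
          (fun o => (n, o, n - (PySem.Int.bitLength o : Int))) := by
  intro μ
  induction μ with
  | zero =>
    intro L start hL hLH hodd h1 h2 hfu
    exfalso
    have hLH' : L.toNat ≤ (PySem.Int.floordiv n 2).toNat := by omega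
    have := pv_pow_le_pow hLH'
    omega
  | succ f ih =>
    intro L start hL hLH hodd h1 h2 hfu
    have hLH' : L.toNat ≤ (PySem.Int.floordiv n 2).toNat := by omega
    have hLE : (2 : Int) ^ (L.toNat) ≤ (2 : Int) ^ ((PySem.Int.floordiv n 2).toNat) :=
      pv_pow_le_pow hLH'
    have hstartE : start < (2 : Int) ^ ((PySem.Int.floordiv n 2).toNat) := lt_of_lt_of_le h2 hLE
    rw [pyRange_two_cons h2, pyRange_two_cons hstartE, List.map_cons, List.map_cons,
        List.cons_append, pv_bitLength_eq L start hL h1 h2]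
    congr 1
    -- evenness of 2^L (L ≥ 1)
    have hLt1 : 1 ≤ L.toNat := by omega
    have heven : (2 : Int) ^ (L.toNat) = 2 * (2 : Int) ^ (L.toNat - 1) := by
      conv_lhs => rw [show L.toNat = (L.toNat - 1) + 1 by omega]
      ring
    by_cases hnext : start + 2 < (2 : Int) ^ (L.toNat)
    · exact ih L (start + 2) hL hLH (by omega) (by omega) hnext (by push_cast at hfu ⊢; omega)
    · -- first bucket exhausted: start = 2^L - 1, next start = 2^L + 1
      have hse : start + 2 = (2 : Int) ^ (L.toNat) + 1 := by omega
      rw [pyRange_two_eq_nil (by omega), List.map_nil, List.nil_append]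
      by_cases hlast : L < PySem.Int.floordiv n 2
      · -- move to the next bucket
        rw [PySem.List.pyRange_one_cons (by omega), List.flatMap_cons]
        have hLL : ((L + 1 - 1).toNat) = L.toNat := by omega
        have hLs : ((L + 1).toNat) = L.toNat + 1 := by omega
        have hpos : (0 : Int) < 2 ^ (L.toNat - 1) := pow_pos (by norm_num) _
        rw [hLL, ← hse]
        exact ih (L + 1) (start + 2) (by omega) (by omega)
          (by omega)
          (by rw [hLL]; omega)
          (by rw [hLs, pow_succ]; omega)
          (by push_cast at hfu ⊢; omega)
      · -- L = n//2: everything is exhausted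
        have hLeq : L = PySem.Int.floordiv n 2 := le_antisymm hLH (by omega)
        rw [PySem.List.pyRange_one_eq_nil (by omega), List.flatMap_nil,
            pyRange_two_eq_nil (by rw [← hLeq]; omega), List.map_nil]

-- port B unfolds to the generalized bucket sum
lemma pv_alt_eq (n b : Int) (hn : 2 ≤ n) (hb1 : 1 ≤ b) (hodd : b % 2 = 1)
    (hblt : b < (2 : Int) ^ ((PySem.Int.floordiv n 2).toNat)) :
    iter_N_exs__zpow_dominance_Nmm__fixed_bit_length__alt n b
      = (PySem.List.pyRange b ((2 : Int) ^ ((PySem.Int.floordiv n 2).toNat)) 2).map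
          (fun o => (n, o, n - (PySem.Int.bitLength o : Int))) := by
  unfold iter_N_exs__zpow_dominance_Nmm__fixed_bit_length__alt
  set bL : Int := (PySem.Int.bitLength b : Int) with hbL
  have hne : b ≠ 0 := by omega
  have habs : (b.natAbs : Int) = b := by omega
  have hbL1 : 1 ≤ bL := by
    have := PySem.Int.lt_two_pow_bitLength b
    rcases Nat.eq_zero_or_pos (PySem.Int.bitLength b) with h0 | hpos
    · rw [h0] at this; simp at this; omega
    · omega
  have hlow : (2 : Int) ^ ((bL - 1).toNat) ≤ b := by
    have := PySem.Int.two_pow_bitLength_le b hne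
    have h4 : ((2 ^ (PySem.Int.bitLength b - 1) : Nat) : Int) ≤ (b.natAbs : Int) := by
      exact_mod_cast this
    rw [habs] at h4
    calc (2 : Int) ^ ((bL - 1).toNat)
        = ((2 ^ (PySem.Int.bitLength b - 1) : Nat) : Int) := by
          rw [show (bL - 1).toNat = PySem.Int.bitLength b - 1 by omega]; push_cast; ring
      _ ≤ b := h4
  have hup : b < (2 : Int) ^ (bL.toNat) := by
    have := PySem.Int.lt_two_pow_bitLength b
    have h4 : (b.natAbs : Int) < ((2 ^ (PySem.Int.bitLength b) : Nat) : Int) := by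
      exact_mod_cast this
    rw [habs] at h4
    calc b < ((2 ^ (PySem.Int.bitLength b) : Nat) : Int) := h4
      _ = (2 : Int) ^ (bL.toNat) := by
          rw [show bL.toNat = PySem.Int.bitLength b by omega]; push_cast; ring
  have hbLH : bL ≤ PySem.Int.floordiv n 2 := by
    by_contra hgt
    have : ((PySem.Int.floordiv n 2).toNat) ≤ (bL - 1).toNat := by
      have h0 : 0 ≤ PySem.Int.floordiv n 2 := by
        rw [pv_floordiv_two]; omega
      omega
    have := pv_pow_le_pow this
    omega
  -- peel the first outer iteration (L = bL, lo = b)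
  rw [PySem.List.pyRange_one_cons (by omega), List.flatMap_cons, if_pos rfl]
  -- in the tail every L' > bL, so the if is false
  rw [pv_flatMap_congr (f := fun L' =>
        (PySem.List.pyRange (if L' = bL then b else (2 : Int) ^ ((L' - 1).toNat) + 1)
          ((2 : Int) ^ (L'.toNat)) 2).map (fun o => (n, o, n - L')))
      (g := fun L' =>
        (PySem.List.pyRange ((2 : Int) ^ ((L' - 1).toNat) + 1) ((2 : Int) ^ (L'.toNat)) 2).map
          (fun o => (n, o, n - L')))
      (by
        intro L' hmem
        rw [PySem.List.mem_pyRange_one] at hmem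
        have hneq : L' ≠ bL := by omega
        simp only [if_neg hneq])]
  have hEnn : (((2 : Int) ^ ((PySem.Int.floordiv n 2).toNat)).toNat : Int)
      = (2 : Int) ^ ((PySem.Int.floordiv n 2).toNat) := Int.toNat_of_nonneg (by positivity)
  exact pv_buckets n (((2 : Int) ^ ((PySem.Int.floordiv n 2).toNat)).toNat) bL b
    hbL1 hbLH hodd hlow hup (by omega)

-- ===== VERDICT (by name: the statement is the Claim_ definition above) =====
theorem iter_N_exs__zpow_dominance_Nmm__fixed_bit_length__spec : Claim_equal_iter_N_exs__zpow_dominance_Nmm__fixed_bit_length_ := by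
  intro n b _ hpre
  obtain ⟨hn, hband, hb1, hblt⟩ := hpre
  have hodd : b % 2 = 1 := by
    rw [PySem.Int.band_one, PySem.Int.mod_eq_emod_of_pos (by norm_num)] at hband
    exact hband
  unfold Spec_iter_N_exs__zpow_dominance_Nmm__fixed_bit_length_
  unfold iter_N_exs__zpow_dominance_Nmm__fixed_bit_length_
  rw [pv_alt_eq n b hn hb1 hodd hblt]
  apply pv_loop_eq n hn _ b hb1
  -- fuel sufficiency: the range end of A lies at or beyond B's endpoint
  have hEP : (2 : Int) ^ ((PySem.Int.floordiv n 2).toNat) ≤ (2 : Int) ^ ((n - 1).toNat) := by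
    apply pv_pow_le_pow
    rw [pv_floordiv_two]; omega
  generalize hE : (2 : Int) ^ ((PySem.Int.floordiv n 2).toNat) = E at hblt hEP ⊢
  generalize hP : (2 : Int) ^ ((n - 1).toNat) = P at hEP ⊢
  omega
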